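-- pv_equiv track=rewrite | github.com/andreiclu/Python_basics | basics_problems/concentric_rug.py | generate_rug
-- ===== SOURCE A (Python) =====
-- def generate_rug(n):
--     rug = [[n // 2 for i in range(n)] for j in range(n)]
--     l = 1
--     while (l <= n // 2):
--         for i in range(l, n - l):
--             for j in range(l, n - l):
--                 rug[i][j] = n // 2 - l
--         l += 1
--
--     return rug
-- ===== SOURCE B (Python) =====
-- def generate_rug(n):
--     h = n // 2
--     return [[h - min(i, j, n - 1 - i, n - 1 - j) for j in range(n)] for i in range(n)]
-- ===== Notes on version B (the rewrite author's own statement) =====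
-- stated objective: faster
-- what changed: Replaces A's repeated repainting of ever-smaller inner squares (a loop over n//2 layers, each rewriting a whole sub-square) by the closed formula value = n//2 - min(i, j, n-1-i, n-1-j) evaluated once per cell in a single double comprehension.
import Mathlib
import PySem

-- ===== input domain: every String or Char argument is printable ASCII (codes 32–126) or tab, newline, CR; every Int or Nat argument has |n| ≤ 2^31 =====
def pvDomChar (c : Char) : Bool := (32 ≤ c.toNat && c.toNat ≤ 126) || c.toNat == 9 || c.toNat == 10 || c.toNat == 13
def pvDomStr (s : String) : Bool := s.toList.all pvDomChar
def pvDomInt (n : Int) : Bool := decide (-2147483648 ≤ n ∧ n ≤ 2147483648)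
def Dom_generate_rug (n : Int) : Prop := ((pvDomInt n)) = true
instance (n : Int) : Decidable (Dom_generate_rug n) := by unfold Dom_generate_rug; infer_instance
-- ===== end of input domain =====

-- B replaces A's layer-by-layer repainting (three nested loops) by the closed formula
-- value = n//2 - min(i, j, n-1-i, n-1-j) computed in a single double comprehension.

-- ===== PORT A =====
-- A mutates rug[i][j] in place; ported with pySetD/pyGetD, which are exact here because
-- every index used (i, j ∈ [l, n-l) with l ≥ 1) is in range of the n-element lists.
def pvPaintRow (n l : Int) (row : List Int) : List Int :=
  (PySem.List.pyRange l (n - l) 1).foldl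
    (fun r j => PySem.List.pySetD r j (PySem.Int.floordiv n 2 - l)) row

def pvPaint (n : Int) (rug : List (List Int)) (l : Int) : List (List Int) :=
  (PySem.List.pyRange l (n - l) 1).foldl
    (fun rg i => PySem.List.pySetD rg i (pvPaintRow n l (PySem.List.pyGetD rg i []))) rug

def generate_rug (n : Int) : List (List Int) :=
  let rug := (PySem.List.pyRange 0 n 1).map
    (fun _ => (PySem.List.pyRange 0 n 1).map (fun _ => PySem.Int.floordiv n 2))
  -- while l ≤ n // 2 starting from l = 1 with l += 1  ≡  for l in range(1, n//2 + 1)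
  (PySem.List.pyRange 1 (PySem.Int.floordiv n 2 + 1) 1).foldl (pvPaint n) rug

-- ===== PORT B =====
def generate_rug_alt (n : Int) : List (List Int) :=
  let h := PySem.Int.floordiv n 2
  (PySem.List.pyRange 0 n 1).map (fun i =>
    (PySem.List.pyRange 0 n 1).map (fun j =>
      h - min (min i j) (min (n - 1 - i) (n - 1 - j))))

-- ===== PRECONDITION & SPEC =====
def Spec_generate_rug (n : Int) (out : List (List Int)) : Prop := out = generate_rug_alt n
instance (n : Int) (out : List (List Int)) : Decidable (Spec_generate_rug n out) := by unfold Spec_generate_rug; infer_instance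

-- ===== CLAIM (what is proved, stated in full; the proofs are below) =====
def Claim_equal_generate_rug : Prop := ∀ (n : Int), Dom_generate_rug n → Spec_generate_rug n (generate_rug n)

-- ===== LEMMAS AND PROOFS =====

-- the value of cell (i, j) after the layers 1, …, L have been painted
def pvVal (n L i j : Int) : Int :=
  PySem.Int.floordiv n 2 - max 0 (min L (min (min i j) (min (n - 1 - i) (n - 1 - j))))

def pvGrid (n L : Int) : List (List Int) :=
  (PySem.List.pyRange 0 n 1).map (fun i =>
    (PySem.List.pyRange 0 n 1).map (fun j => pvVal n L i j))

theorem pv_set_map {α : Type} (g : Int → α) (n t : Int) (v : α)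
    (h0 : 0 ≤ t) (_h1 : t < n) :
    ((PySem.List.pyRange 0 n 1).map g).set t.toNat v
      = (PySem.List.pyRange 0 n 1).map (fun x => if x = t then v else g x) := by
  apply List.ext_getElem
  · simp
  · intro k hk hk'
    simp only [List.getElem_set, List.getElem_map,
      PySem.List.getElem_pyRange_one]
    have hkn : (k : Int) < n := by
      have := hk; simp [PySem.List.length_pyRange_one] at this; omega
    split_ifs with h h' h'
    · rfl
    · omega
    · omega
    · rfl

theorem pv_row_fold {α : Type} (n hi : Int) (v : α) (hn : hi ≤ n) :
    ∀ (k : Nat) (lo : Int) (g : Int → α), 0 ≤ lo → (hi - lo).toNat = k →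
    (PySem.List.pyRange lo hi 1).foldl (fun r j => PySem.List.pySetD r j v)
        ((PySem.List.pyRange 0 n 1).map g)
      = (PySem.List.pyRange 0 n 1).map (fun x => if lo ≤ x ∧ x < hi then v else g x) := by
  intro k
  induction k with
  | zero =>
    intro lo g hlo hk
    rw [PySem.List.pyRange_one_eq_nil (show hi ≤ lo by omega)]
    simp only [List.foldl_nil]
    apply List.map_congr_left
    intro x hx
    rw [if_neg (by omega)]
  | succ m ih =>
    intro lo g hlo hk
    have hlt : lo < hi := by omega
    rw [PySem.List.pyRange_one_cons hlt]
    simp only [List.foldl_cons]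
    rw [PySem.List.pySetD_of_nonneg _ _ hlo, pv_set_map g n lo v hlo (by omega)]
    rw [ih (lo + 1) _ (by omega) (by omega)]
    apply List.map_congr_left
    intro x hmem
    split_ifs <;> first | rfl | (exfalso; omega)

theorem pv_grid_fold (n hi l : Int) (hn : hi ≤ n) :
    ∀ (k : Nat) (lo : Int) (R : Int → List Int), 0 ≤ lo → (hi - lo).toNat = k →
    (PySem.List.pyRange lo hi 1).foldl
        (fun rg i => PySem.List.pySetD rg i (pvPaintRow n l (PySem.List.pyGetD rg i [])))
        ((PySem.List.pyRange 0 n 1).map R)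
      = (PySem.List.pyRange 0 n 1).map
          (fun i => if lo ≤ i ∧ i < hi then pvPaintRow n l (R i) else R i) := by
  intro k
  induction k with
  | zero =>
    intro lo R hlo hk
    rw [PySem.List.pyRange_one_eq_nil (show hi ≤ lo by omega)]
    simp only [List.foldl_nil]
    apply List.map_congr_left
    intro i hmem
    rw [if_neg (by omega)]
  | succ m ih =>
    intro lo R hlo hk
    have hlt : lo < hi := by omega
    rw [PySem.List.pyRange_one_cons hlt]
    simp only [List.foldl_cons]
    rw [PySem.List.pyGetD_map_pyRange_of_nonneg R n lo [] hlo (by omega),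
      PySem.List.pySetD_of_nonneg _ _ hlo,
      pv_set_map R n lo (pvPaintRow n l (R lo)) hlo (by omega)]
    rw [ih (lo + 1) _ (by omega) (by omega)]
    apply List.map_congr_left
    intro i hmem
    split_ifs <;> first | rfl | (exfalso; omega) | simp_all

theorem pv_paint_step (n L : Int) (_h1 : 1 ≤ L + 1) (h2 : L + 1 ≤ PySem.Int.floordiv n 2) :
    pvPaint n (pvGrid n L) (L + 1) = pvGrid n (L + 1) := by
  have hdiv : PySem.Int.floordiv n 2 = n / 2 :=
    PySem.Int.floordiv_eq_ediv_of_pos (by norm_num)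
  have hdiv2 : L + 1 ≤ n / 2 := by rw [hdiv] at h2; exact h2
  unfold pvPaint pvGrid
  rw [pv_grid_fold n (n - (L + 1)) (L + 1) (by omega) (n - (L + 1) - (L + 1)).toNat
      (L + 1) _ (by omega) rfl]
  apply List.map_congr_left
  intro i hi
  rw [PySem.List.mem_pyRange_one] at hi
  by_cases hin : (L + 1) ≤ i ∧ i < n - (L + 1)
  · rw [if_pos hin]
    unfold pvPaintRow
    rw [pv_row_fold n (n - (L + 1)) _ (by omega) (n - (L + 1) - (L + 1)).toNat
        (L + 1) _ (by omega) rfl]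
    apply List.map_congr_left
    intro j hj
    rw [PySem.List.mem_pyRange_one] at hj
    by_cases hjn : (L + 1) ≤ j ∧ j < n - (L + 1)
    · rw [if_pos hjn]
      simp only [pvVal, hdiv]
      omega
    · rw [if_neg hjn]
      simp only [pvVal, hdiv]
      omega
  · rw [if_neg hin]
    apply List.map_congr_left
    intro j hj
    rw [PySem.List.mem_pyRange_one] at hj
    simp only [pvVal, hdiv]
    omega

theorem pv_layers (n : Int) :
    ∀ (k : Nat), (k : Int) ≤ PySem.Int.floordiv n 2 →
    (PySem.List.pyRange 1 ((k : Int) + 1) 1).foldl (pvPaint n) (pvGrid n 0)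
      = pvGrid n k := by
  intro k
  induction k with
  | zero =>
    intro _
    rw [PySem.List.pyRange_one_eq_nil (by omega)]
    rfl
  | succ m ih =>
    intro hk
    have : ((m : Int) + 1) + 1 = ((m : Int) + 1) + 1 := rfl
    rw [show ((((m + 1 : Nat)) : Int) + 1) = ((m : Int) + 1) + 1 by push_cast; ring,
      PySem.List.pyRange_one_succ_right (by omega)]
    rw [List.foldl_append]
    rw [ih (by push_cast at hk ⊢; omega)]
    simp only [List.foldl_cons, List.foldl_nil]
    rw [pv_paint_step n m (by omega) (by push_cast at hk; omega)]
    norm_num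

theorem pv_grid0 (n : Int) :
    (PySem.List.pyRange 0 n 1).map (fun _ =>
      (PySem.List.pyRange 0 n 1).map (fun _ => PySem.Int.floordiv n 2)) = pvGrid n 0 := by
  unfold pvGrid
  apply List.map_congr_left
  intro i hi
  rw [PySem.List.mem_pyRange_one] at hi
  apply List.map_congr_left
  intro j hj
  rw [PySem.List.mem_pyRange_one] at hj
  simp only [pvVal]
  omega

theorem pv_grid_final (n : Int) :
    pvGrid n (PySem.Int.floordiv n 2) = generate_rug_alt n := by
  have hdiv : PySem.Int.floordiv n 2 = n / 2 :=
    PySem.Int.floordiv_eq_ediv_of_pos (by norm_num)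
  unfold pvGrid generate_rug_alt
  apply List.map_congr_left
  intro i hi
  rw [PySem.List.mem_pyRange_one] at hi
  apply List.map_congr_left
  intro j hj
  rw [PySem.List.mem_pyRange_one] at hj
  simp only [pvVal, hdiv]
  omega

-- ===== VERDICT (by name: the statement is the Claim_ definition above) =====
theorem generate_rug_spec : Claim_equal_generate_rug := by
  intro n _
  unfold Spec_generate_rug generate_rug
  simp only []
  rw [pv_grid0]
  have hdiv : PySem.Int.floordiv n 2 = n / 2 :=
    PySem.Int.floordiv_eq_ediv_of_pos (by norm_num)
  by_cases hn : 0 ≤ n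
  · have h0 : 0 ≤ PySem.Int.floordiv n 2 := by rw [hdiv]; omega
    have := pv_layers n (PySem.Int.floordiv n 2).toNat (by omega)
    rw [show (((PySem.Int.floordiv n 2).toNat : Int) + 1) = PySem.Int.floordiv n 2 + 1 by omega] at this
    rw [this]
    rw [show ((PySem.Int.floordiv n 2).toNat : Int) = PySem.Int.floordiv n 2 by omega]
    exact pv_grid_final n
  · rw [PySem.List.pyRange_one_eq_nil (show PySem.Int.floordiv n 2 + 1 ≤ 1 by rw [hdiv]; omega)]
    simp only [List.foldl_nil]
    rw [← pv_grid_final n]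
    unfold pvGrid
    rw [PySem.List.pyRange_one_eq_nil (show n ≤ 0 by omega)]
    simp
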